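-- pv_equiv track=rewrite | github.com/YbeVerheyen/coursematerial_2425 | 10-sets/04-assignment-spellcheck/student.py | spellcheck
-- ===== SOURCE A (Python) =====
-- def spellcheck(document, valid_words):
--     valid_set = set(valid_words)
--     new_set = set()
--     words = document.split()
--     for word in words:
--         word = word.lower()
--         if word not in valid_set:
--             new_set.add(word)
--     return new_set
-- ===== SOURCE B (Python) =====
-- def spellcheck(document, valid_words):
--     # Index every lowercased document word once (ordered dedup), then delete
--     # the dictionary words from the index; what survives is misspelled.
--     seen = dict.fromkeys(w.lower() for w in document.split())
--     for v in valid_words: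
--         seen.pop(v, None)
--     return set(seen)
-- ===== Notes on version B (the rewrite author's own statement) =====
-- stated objective: alternative
-- what changed: Instead of looping over document words with a per-word membership test and conditional set.add, B indexes all lowercased document words once with dict.fromkeys and then loops over the dictionary words, deleting each from that index; the survivors are the misspelled words.
import Mathlib
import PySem

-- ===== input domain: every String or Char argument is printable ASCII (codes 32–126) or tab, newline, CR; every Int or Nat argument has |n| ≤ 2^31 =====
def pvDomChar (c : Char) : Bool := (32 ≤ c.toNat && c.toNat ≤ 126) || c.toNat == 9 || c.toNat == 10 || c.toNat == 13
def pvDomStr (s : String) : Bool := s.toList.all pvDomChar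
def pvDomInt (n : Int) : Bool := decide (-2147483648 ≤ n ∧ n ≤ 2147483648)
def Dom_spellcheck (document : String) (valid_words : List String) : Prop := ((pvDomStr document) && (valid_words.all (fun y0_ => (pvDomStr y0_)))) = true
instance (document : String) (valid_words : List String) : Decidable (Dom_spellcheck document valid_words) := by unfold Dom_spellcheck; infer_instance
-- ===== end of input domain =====

-- B replaces A's per-word membership loop by indexing the document words once
-- (dict.fromkeys) and then deleting each dictionary word from the index (alternative, same cost).


-- ===== PORT A =====
def spellcheck (document : String) (valid_words : List String) : List String :=
  let valid_set : PySem.Set String := PySem.Set.ofList valid_words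
  let words := PySem.Str.split₀ document
  words.foldl (fun new_set word =>
    let word := PySem.Str.lower word
    if !(PySem.Set.contains valid_set word) then PySem.Set.add new_set word else new_set)
    PySem.Set.empty

-- ===== PORT B =====
-- dict.fromkeys over the lowercased words is the ordered dedup of their list (PySem.List.dedup);
-- seen.pop(v, None) removes the key v if present = List.erase on the nodup key list.
def spellcheck_alt (document : String) (valid_words : List String) : List String :=
  let seen := PySem.List.dedup ((PySem.Str.split₀ document).map PySem.Str.lower)
  let seen := valid_words.foldl (fun s v => s.erase v) seen
  PySem.Set.ofList seen

-- ===== PRECONDITION & SPEC =====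
def Spec_spellcheck (document : String) (valid_words : List String) (out : List String) : Prop := out = spellcheck_alt document valid_words
instance (document : String) (valid_words : List String) (out : List String) : Decidable (Spec_spellcheck document valid_words out) := by unfold Spec_spellcheck; infer_instance

-- ===== CLAIM (what is proved, stated in full; the proofs are below) =====
def Claim_equal_spellcheck : Prop := ∀ (document : String) (valid_words : List String), Dom_spellcheck document valid_words → Spec_spellcheck document valid_words (spellcheck document valid_words)

-- ===== LEMMAS AND PROOFS =====

-- A's conditional-add loop over f-images is Set.update with the valid words filtered out
theorem foldl_cadd_eq_update {α : Type} [BEq α] [LawfulBEq α] (V : PySem.Set α) (f : α → α) :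
    ∀ (l : List α) (s : PySem.Set α),
      l.foldl (fun t w => if !(PySem.Set.contains V (f w)) then PySem.Set.add t (f w) else t) s
        = PySem.Set.update s ((l.map f).filter (fun w => !(PySem.Set.contains V w))) := by
  intro l
  induction l with
  | nil => intro s; rfl
  | cons x l ih =>
    intro s
    cases hc : PySem.Set.contains V (f x) with
    | false =>
      rw [List.foldl_cons, if_pos (by simpa using hc), List.map_cons, List.filter_cons,
        if_pos (by simpa using hc), PySem.Set.update_cons, ih]
    | true =>
      rw [List.foldl_cons, if_neg (by simpa using hc), List.map_cons, List.filter_cons,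
        if_neg (by simpa using hc), ih]

theorem filter_discard {α : Type} [BEq α] [LawfulBEq α] (p : α → Bool) (s : PySem.Set α) (x : α) :
    (PySem.Set.discard s x).filter p = PySem.Set.discard (s.filter p) x := by
  simp [PySem.Set.discard, List.filter_filter, Bool.and_comm]

theorem filter_discard_of_false {α : Type} [BEq α] [LawfulBEq α] (p : α → Bool) (s : PySem.Set α)
    (x : α) (hx : p x = false) : (PySem.Set.discard s x).filter p = s.filter p := by
  simp only [PySem.Set.discard, List.filter_filter]
  refine List.filter_congr (fun y _ => ?_)
  by_cases hy : y = x
  · subst hy; simp [hx]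
  · simp [hy]

-- set() of a filtered list = filtering the set (first occurrences survive filtering)
theorem ofList_filter {α : Type} [BEq α] [LawfulBEq α] (p : α → Bool) :
    ∀ l : List α, PySem.Set.ofList (l.filter p) = (PySem.Set.ofList l).filter p := by
  intro l
  induction l with
  | nil => rfl
  | cons x l ih =>
    cases hx : p x with
    | true =>
      simp [hx, PySem.Set.ofList_cons, ih, filter_discard]
    | false =>
      simp only [List.filter_cons, hx, Bool.false_eq_true, ite_false, PySem.Set.ofList_cons, ih,
        filter_discard_of_false p (PySem.Set.ofList l) x hx]

-- B's deletion loop over a nodup key list keeps exactly the keys not in valid_words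
theorem foldl_erase_eq_filter {α : Type} [DecidableEq α] :
    ∀ (V : List α) (s : List α), s.Nodup →
      V.foldl (fun s v => s.erase v) s = s.filter (fun w => !(decide (w ∈ V))) := by
  intro V
  induction V with
  | nil => intro s _; simp
  | cons v V ih =>
    intro s hs
    rw [List.foldl_cons, ih (s.erase v) (hs.erase v), List.Nodup.erase_eq_filter hs,
      List.filter_filter]
    refine List.filter_congr (fun y _ => ?_)
    by_cases hy : y = v <;> simp [hy]

-- ===== VERDICT (by name: the statement is the Claim_ definition above) =====
theorem spellcheck_spec : Claim_equal_spellcheck := by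
  intro document valid_words _
  show spellcheck document valid_words = spellcheck_alt document valid_words
  unfold spellcheck spellcheck_alt
  dsimp only
  rw [foldl_cadd_eq_update, PySem.Set.update_empty, ofList_filter,
    PySem.List.dedup_eq_ofList,
    foldl_erase_eq_filter _ _ (PySem.Set.nodup_ofList _)]
  have hnd : (List.filter (fun w => !decide (w ∈ valid_words))
      (PySem.Set.ofList ((PySem.Str.split₀ document).map PySem.Str.lower))).Nodup :=
    (PySem.Set.nodup_ofList _).filter _
  rw [PySem.Set.ofList_eq_self_of_nodup _ hnd]
  refine List.filter_congr (fun w _ => ?_)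
  simp [PySem.Set.contains_eq_listContains, PySem.Set.mem_ofList]
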